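-- pv_equiv track=rewrite | github.com/CelesteSabater/Proyectos-personales | Generador de Árbol Filogenético/cjt_especies.py | juntar
-- ===== SOURCE A (Python) =====
-- def juntar(kmer1, kmer2):
--     it1 = 0
--     it2 = 0
--     llaves1 = sorted(kmer1.keys())
--     llaves2 = sorted(kmer2.keys())
--     conjunto = []
--     while it1 < len(llaves1) and it2 < len(llaves2):
--         if llaves1[it1] < llaves2[it2]:
--             conjunto.append((kmer1[llaves1[it1]],0))
--             it1 += 1
--         elif llaves1[it1] > llaves2[it2]:
--             conjunto.append((0,kmer2[llaves2[it2]]))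
--             it2 += 1
--         else:
--             conjunto.append((kmer1[llaves1[it1]],kmer2[llaves2[it2]]))
--             it1 += 1
--             it2 += 1
--     while it1 < len(kmer1):
--         conjunto.append((kmer1[llaves1[it1]], 0))
--         it1 += 1
--     while it2 < len(kmer2):
--         conjunto.append((0, kmer2[llaves2[it2]]))
--         it2 += 1
--     return conjunto
-- ===== SOURCE B (Python) =====
-- def juntar(kmer1, kmer2):
--     claves = sorted(set(kmer1) | set(kmer2))
--     return [(kmer1.get(k, 0), kmer2.get(k, 0)) for k in claves]
-- ===== Notes on version B (the rewrite author's own statement) =====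
-- stated objective: simpler
-- what changed: Replaces the two-pointer merge over the two sorted key lists (plus two tail loops) with a sorted union of the key sets and a single comprehension using dict.get with default 0.
import Mathlib
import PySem

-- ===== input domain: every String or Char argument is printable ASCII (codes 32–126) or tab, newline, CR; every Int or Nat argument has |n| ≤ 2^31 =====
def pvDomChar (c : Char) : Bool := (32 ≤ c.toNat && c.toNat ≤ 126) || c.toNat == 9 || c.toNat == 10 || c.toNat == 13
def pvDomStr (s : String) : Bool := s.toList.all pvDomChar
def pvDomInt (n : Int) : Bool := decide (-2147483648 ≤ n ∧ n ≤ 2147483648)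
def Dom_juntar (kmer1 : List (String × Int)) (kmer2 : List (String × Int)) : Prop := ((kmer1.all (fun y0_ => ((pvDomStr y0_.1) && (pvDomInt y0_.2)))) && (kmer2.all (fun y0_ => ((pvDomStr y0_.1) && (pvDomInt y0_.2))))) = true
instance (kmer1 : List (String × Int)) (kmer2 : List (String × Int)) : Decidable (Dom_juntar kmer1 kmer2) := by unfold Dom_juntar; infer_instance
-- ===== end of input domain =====

-- B replaces A's two-pointer merge over the two sorted key lists by a sorted union of the
-- key sets plus per-key dict lookups with default 0 (objective: simpler).

-- ===== PORT A =====
-- the `while it1 < len(llaves1) and it2 < len(llaves2)` loop plus the two tail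
-- `while` loops (for a dict, len(kmer1) = len(llaves1)), as recursion on the two lists
def juntarMerge (d1 d2 : PySem.Dict String Int) : List String → List String → List (Int × Int)
  | k1 :: t1, k2 :: t2 =>
      if k1 < k2 then (d1.getD k1 0, 0) :: juntarMerge d1 d2 t1 (k2 :: t2)
      else if k2 < k1 then (0, d2.getD k2 0) :: juntarMerge d1 d2 (k1 :: t1) t2
      else (d1.getD k1 0, d2.getD k2 0) :: juntarMerge d1 d2 t1 t2
  | l1, [] => l1.map (fun k => (d1.getD k 0, 0))
  | [], l2 => l2.map (fun k => (0, d2.getD k 0))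
  termination_by l1 l2 => l1.length + l2.length

def juntar (kmer1 : List (String × Int)) (kmer2 : List (String × Int)) : List (Int × Int) :=
  let d1 := PySem.Dict.ofList kmer1
  let d2 := PySem.Dict.ofList kmer2
  let llaves1 := PySem.List.sorted d1.keys (fun k => k) false
  let llaves2 := PySem.List.sorted d2.keys (fun k => k) false
  juntarMerge d1 d2 llaves1 llaves2

-- ===== PORT B =====
def juntar_alt (kmer1 : List (String × Int)) (kmer2 : List (String × Int)) : List (Int × Int) :=
  let d1 := PySem.Dict.ofList kmer1
  let d2 := PySem.Dict.ofList kmer2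
  let claves := PySem.List.sorted (PySem.Set.union (PySem.Set.ofList d1.keys) d2.keys) (fun k => k) false
  claves.map (fun k => (d1.getD k 0, d2.getD k 0))

-- ===== PRECONDITION & SPEC =====
def Spec_juntar (kmer1 : List (String × Int)) (kmer2 : List (String × Int)) (out : List (Int × Int)) : Prop := out = juntar_alt kmer1 kmer2
instance (kmer1 : List (String × Int)) (kmer2 : List (String × Int)) (out : List (Int × Int)) : Decidable (Spec_juntar kmer1 kmer2 out) := by unfold Spec_juntar; infer_instance

-- ===== CLAIM (what is proved, stated in full; the proofs are below) =====
def Claim_equal_juntar : Prop := ∀ (kmer1 : List (String × Int)) (kmer2 : List (String × Int)), Dom_juntar kmer1 kmer2 → Spec_juntar kmer1 kmer2 (juntar kmer1 kmer2)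

-- ===== LEMMAS AND PROOFS =====

-- the ordered union of the two key lists, in the order A's merge emits keys
def keyU : List String → List String → List String
  | k1 :: t1, k2 :: t2 =>
      if k1 < k2 then k1 :: keyU t1 (k2 :: t2)
      else if k2 < k1 then k2 :: keyU (k1 :: t1) t2
      else k1 :: keyU t1 t2
  | l1, [] => l1
  | [], l2 => l2
  termination_by l1 l2 => l1.length + l2.length

theorem keyU_cons_lt {k1 k2 : String} (t1 t2 : List String) (h : k1 < k2) :
    keyU (k1 :: t1) (k2 :: t2) = k1 :: keyU t1 (k2 :: t2) := by simp [keyU, h]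

theorem keyU_cons_gt {k1 k2 : String} (t1 t2 : List String) (h : ¬k1 < k2) (h' : k2 < k1) :
    keyU (k1 :: t1) (k2 :: t2) = k2 :: keyU (k1 :: t1) t2 := by simp [keyU, h, h']

theorem keyU_cons_eq {k1 k2 : String} (t1 t2 : List String) (h : ¬k1 < k2) (h' : ¬k2 < k1) :
    keyU (k1 :: t1) (k2 :: t2) = k1 :: keyU t1 t2 := by simp [keyU, h, h']

theorem mem_keyU (x : String) : ∀ l1 l2 : List String, x ∈ keyU l1 l2 ↔ x ∈ l1 ∨ x ∈ l2 := by
  intro l1 l2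
  induction l1, l2 using keyU.induct with
  | case1 k1 t1 k2 t2 h ih => rw [keyU_cons_lt t1 t2 h]; simp [ih]; tauto
  | case2 k1 t1 k2 t2 h h' ih => rw [keyU_cons_gt t1 t2 h h']; simp [ih]; tauto
  | case3 k1 t1 k2 t2 h h' ih =>
      have he : k1 = k2 := le_antisymm (not_lt.mp h') (not_lt.mp h)
      subst he
      rw [keyU_cons_eq t1 t2 h h']; simp [ih]; tauto
  | case4 l1 => cases l1 <;> simp [keyU]
  | case5 l2 _ => simp [keyU]

theorem keyU_pairwise : ∀ l1 l2 : List String, l1.Pairwise (· < ·) → l2.Pairwise (· < ·) →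
    (keyU l1 l2).Pairwise (· < ·) := by
  intro l1 l2 h1 h2
  induction l1, l2 using keyU.induct with
  | case1 k1 t1 k2 t2 h ih =>
      rw [List.pairwise_cons] at h1
      rw [keyU_cons_lt t1 t2 h, List.pairwise_cons]
      refine ⟨?_, ih h1.2 h2⟩
      intro y hy
      rcases (mem_keyU y t1 (k2 :: t2)).mp hy with hm | hm
      · exact h1.1 y hm
      · rcases List.mem_cons.mp hm with rfl | hm
        · exact h
        · exact lt_trans h ((List.pairwise_cons.mp h2).1 y hm)
  | case2 k1 t1 k2 t2 h h' ih =>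
      rw [List.pairwise_cons] at h2
      rw [keyU_cons_gt t1 t2 h h', List.pairwise_cons]
      refine ⟨?_, ih h1 h2.2⟩
      intro y hy
      rcases (mem_keyU y (k1 :: t1) t2).mp hy with hm | hm
      · rcases List.mem_cons.mp hm with rfl | hm
        · exact h'
        · exact lt_trans h' ((List.pairwise_cons.mp h1).1 y hm)
      · exact h2.1 y hm
  | case3 k1 t1 k2 t2 h h' ih =>
      have he : k1 = k2 := le_antisymm (not_lt.mp h') (not_lt.mp h)
      subst he
      rw [List.pairwise_cons] at h1 h2
      rw [keyU_cons_eq t1 t2 h h', List.pairwise_cons]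
      refine ⟨?_, ih h1.2 h2.2⟩
      intro y hy
      rcases (mem_keyU y t1 t2).mp hy with hm | hm
      · exact h1.1 y hm
      · exact h2.1 y hm
  | case4 l1 => rw [show keyU l1 [] = l1 from by cases l1 <;> simp [keyU]]; exact h1
  | case5 l2 _ => rw [show keyU [] l2 = l2 from by cases l2 <;> simp [keyU]]; exact h2

theorem merge_eq_map (d1 d2 : PySem.Dict String Int) :
    ∀ l1 l2 : List String, l1.Pairwise (· < ·) → l2.Pairwise (· < ·) →
    juntarMerge d1 d2 l1 l2 =
      (keyU l1 l2).map (fun k =>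
        ((if k ∈ l1 then d1.getD k 0 else 0), (if k ∈ l2 then d2.getD k 0 else 0))) := by
  intro l1 l2 h1 h2
  induction l1, l2 using keyU.induct with
  | case1 k1 t1 k2 t2 h ih =>
      rw [List.pairwise_cons] at h1
      have hk1l2 : k1 ∉ (k2 :: t2) := by
        intro hm
        rcases List.mem_cons.mp hm with rfl | hm
        · exact absurd h (lt_irrefl k1)
        · exact absurd (lt_trans h ((List.pairwise_cons.mp h2).1 k1 hm)) (lt_irrefl k1)
      rw [keyU_cons_lt t1 t2 h]
      simp only [juntarMerge, if_pos h]
      rw [ih h1.2 h2, List.map_cons, List.cons_eq_cons]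
      constructor
      · simp [hk1l2]
      · apply List.map_congr_left
        intro y hy
        have hyne : y ≠ k1 := by
          intro heq; subst heq
          rcases (mem_keyU y t1 (k2 :: t2)).mp hy with hm | hm
          · exact absurd (h1.1 y hm) (lt_irrefl y)
          · exact hk1l2 hm
        simp [List.mem_cons, hyne]
  | case2 k1 t1 k2 t2 h h' ih =>
      rw [List.pairwise_cons] at h2
      have hk2l1 : k2 ∉ (k1 :: t1) := by
        intro hm
        rcases List.mem_cons.mp hm with rfl | hm
        · exact absurd h' (lt_irrefl k2)
        · exact absurd (lt_trans h' ((List.pairwise_cons.mp h1).1 k2 hm)) (lt_irrefl k2)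
      rw [keyU_cons_gt t1 t2 h h']
      simp only [juntarMerge, if_neg h, if_pos h']
      rw [ih h1 h2.2, List.map_cons, List.cons_eq_cons]
      constructor
      · simp [hk2l1]
      · apply List.map_congr_left
        intro y hy
        have hyne : y ≠ k2 := by
          intro heq; subst heq
          rcases (mem_keyU y (k1 :: t1) t2).mp hy with hm | hm
          · exact hk2l1 hm
          · exact absurd (h2.1 y hm) (lt_irrefl y)
        simp [List.mem_cons, hyne]
  | case3 k1 t1 k2 t2 h h' ih =>
      have he : k1 = k2 := le_antisymm (not_lt.mp h') (not_lt.mp h)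
      subst he
      rw [List.pairwise_cons] at h1 h2
      rw [keyU_cons_eq t1 t2 h h']
      simp only [juntarMerge, if_neg h]
      rw [ih h1.2 h2.2, List.map_cons, List.cons_eq_cons]
      refine ⟨by simp, ?_⟩
      apply List.map_congr_left
      intro y hy
      have hyne : y ≠ k1 := by
        intro heq; subst heq
        rcases (mem_keyU y t1 t2).mp hy with hm | hm
        · exact absurd (h1.1 y hm) (lt_irrefl y)
        · exact absurd (h2.1 y hm) (lt_irrefl y)
      simp [List.mem_cons, hyne]
  | case4 l1 =>
      cases l1 with
      | nil => simp [juntarMerge, keyU]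
      | cons k t =>
          simp only [juntarMerge, keyU]
          apply List.map_congr_left
          intro y hy
          simp [hy]
  | case5 l2 hne =>
      cases l2 with
      | nil => exact absurd rfl (hne)
      | cons k t =>
          simp only [juntarMerge, keyU]
          apply List.map_congr_left
          intro y hy
          simp [hy]

theorem pairwise_lt_of_sorted_nodup (xs : List String) (hnd : xs.Nodup) :
    (PySem.List.sorted xs (fun k => k) false).Pairwise (· < ·) := by
  have hle := PySem.List.sorted_pairwise (xs := xs) (key := fun k => k)
  have hnd' : (PySem.List.sorted xs (fun k => k) false).Nodup :=
    (PySem.List.sorted_perm (xs := xs) (key := fun k => k) (rev := false)).nodup_iff.mpr hnd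
  have := List.Pairwise.and hle hnd'
  exact this.imp (fun h => lt_of_le_of_ne h.1 h.2)

-- ===== VERDICT (by name: the statement is the Claim_ definition above) =====
theorem juntar_spec : Claim_equal_juntar := by
  intro kmer1 kmer2 _
  unfold Spec_juntar juntar juntar_alt
  dsimp only
  set d1 := PySem.Dict.ofList kmer1 with hd1
  set d2 := PySem.Dict.ofList kmer2 with hd2
  have hnd1 : d1.keys.Nodup := PySem.Dict.nodup_keys_ofList kmer1
  have hnd2 : d2.keys.Nodup := PySem.Dict.nodup_keys_ofList kmer2
  set l1 := PySem.List.sorted d1.keys (fun k => k) false with hl1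
  set l2 := PySem.List.sorted d2.keys (fun k => k) false with hl2
  have hp1 : l1.Pairwise (· < ·) := pairwise_lt_of_sorted_nodup _ hnd1
  have hp2 : l2.Pairwise (· < ·) := pairwise_lt_of_sorted_nodup _ hnd2
  -- the sorted union of the key sets is exactly keyU l1 l2
  have hU : PySem.List.sorted (PySem.Set.union (PySem.Set.ofList d1.keys) d2.keys) (fun k => k) false
      = keyU l1 l2 := by
    apply PySem.List.sorted_eq_of_perm_of_pairwise_lt
    · apply (List.perm_ext_iff_of_nodup ?_ ?_).mpr
      · intro a
        rw [mem_keyU]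
        simp [hl1, hl2, PySem.List.mem_sorted, PySem.Set.mem_union, PySem.Set.mem_ofList]
      · exact (keyU_pairwise l1 l2 hp1 hp2).nodup
      · exact PySem.Set.nodup_union _ _ (PySem.Set.nodup_ofList _)
    · exact keyU_pairwise l1 l2 hp1 hp2
  rw [hU, merge_eq_map d1 d2 l1 l2 hp1 hp2]
  apply List.map_congr_left
  intro y hy
  have hy' := (mem_keyU y l1 l2).mp hy
  have hmem1 : y ∈ l1 ↔ d1.contains y = true := by
    rw [hl1, PySem.List.mem_sorted, ← PySem.Dict.contains_iff_mem_keys]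
  have hmem2 : y ∈ l2 ↔ d2.contains y = true := by
    rw [hl2, PySem.List.mem_sorted, ← PySem.Dict.contains_iff_mem_keys]
  have hz1 : y ∉ l1 → d1.getD y 0 = 0 := by
    intro hn
    exact PySem.Dict.getD_of_not_contains d1 0 (by
      rw [Bool.eq_false_iff]; intro hc; exact hn (hmem1.mpr hc))
  have hz2 : y ∉ l2 → d2.getD y 0 = 0 := by
    intro hn
    exact PySem.Dict.getD_of_not_contains d2 0 (by
      rw [Bool.eq_false_iff]; intro hc; exact hn (hmem2.mpr hc))
  by_cases h1 : y ∈ l1 <;> by_cases h2 : y ∈ l2 <;>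
    simp_all
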